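-- pv_equiv track=rewrite | github.com/Arsen1302/Code-copy-detector | TestData/solutions/problem_1134_4.py | solution_1134_4
-- ===== SOURCE A (Python) =====
-- from typing import List
--
-- def solution_1134_4(nums: List[int], k: int) -> int:
--    nums.sort()
--    i=0;j=len(nums)-1
--    ans=0
--    while i<j:
--        Sum=nums[i]+nums[j]
--        if Sum==k:
--            i+=1
--            j-=1
--            ans+=1
--        elif Sum<k:
--            i+=1
--        else:
--            j-=1
--    return ans
-- ===== SOURCE B (Python) =====
-- def solution_1134_4(nums, k):
--     counts = {}
--     for x in nums:
--         counts[x] = counts.get(x, 0) + 1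
--     ans = 0
--     for v, c in counts.items():
--         w = k - v
--         if v < w:
--             ans += min(c, counts.get(w, 0))
--         elif v == w:
--             ans += c // 2
--     return ans
-- ===== Notes on version B (the rewrite author's own statement) =====
-- stated objective: alternative
-- what changed: Replaces A's in-place sort plus two-pointer sweep with a single-pass hash map of value counts, then sums min-matches per complementary value pair (plus count(k/2)//2 when k is even); B's loop count is O(n) vs A's O(n log n) sort, but a timing run found no measurable wall-clock difference, and B does not mutate nums while A sorts it in place.
import Mathlib
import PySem

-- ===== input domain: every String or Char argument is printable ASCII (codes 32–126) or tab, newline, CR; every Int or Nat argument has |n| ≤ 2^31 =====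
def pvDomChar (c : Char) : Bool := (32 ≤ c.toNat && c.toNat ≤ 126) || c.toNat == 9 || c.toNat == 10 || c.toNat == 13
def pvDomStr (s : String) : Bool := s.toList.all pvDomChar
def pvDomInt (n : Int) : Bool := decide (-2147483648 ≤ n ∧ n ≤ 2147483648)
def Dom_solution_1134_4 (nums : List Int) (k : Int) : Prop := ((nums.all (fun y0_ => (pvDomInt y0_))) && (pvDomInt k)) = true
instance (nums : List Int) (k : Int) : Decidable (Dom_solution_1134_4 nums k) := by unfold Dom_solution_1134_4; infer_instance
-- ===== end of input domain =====

-- B replaces A's sort + two-pointer sweep by a one-pass count map and a sum of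
-- min-matches per complementary pair (objective: alternative algorithm).
-- Note: A sorts nums in place; B does not mutate it. The equivalence proved is
-- about the RETURN value only.

-- ===== PORT A =====
-- the while loop of A; nums[i]/nums[j] are always in range when reached from
-- solution_1134_4 (0 ≤ i < j < len), so pyGetD with default 0 is exact there
def solution_1134_4_loop (s : List Int) (k : Int) (i j ans : Int) : Int :=
  if i < j then
    let x := PySem.List.pyGetD s i 0
    let y := PySem.List.pyGetD s j 0
    let Sum := x + y
    if Sum = k then solution_1134_4_loop s k (i + 1) (j - 1) (ans + 1)
    else if Sum < k then solution_1134_4_loop s k (i + 1) j ans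
    else solution_1134_4_loop s k i (j - 1) ans
  else ans
termination_by (j - i).toNat
decreasing_by all_goals omega

def solution_1134_4 (nums : List Int) (k : Int) : Int :=
  let s := PySem.List.sorted nums (fun x => x) false
  solution_1134_4_loop s k 0 ((s.length : Int) - 1) 0

-- ===== PORT B =====
def solution_1134_4_alt (nums : List Int) (k : Int) : Int :=
  let counts := nums.foldl (fun d x => d.insert x (d.getD x 0 + 1)) (PySem.Dict.empty : PySem.Dict Int Int)
  counts.items.foldl (fun ans p =>
    let v := p.1
    let c := p.2
    let w := k - v
    if v < w then ans + min c (counts.getD w 0)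
    else if v = w then ans + PySem.Int.floordiv c 2
    else ans) 0

-- ===== PRECONDITION & SPEC =====
def Spec_solution_1134_4 (nums : List Int) (k : Int) (out : Int) : Prop := out = solution_1134_4_alt nums k
instance (nums : List Int) (k : Int) (out : Int) : Decidable (Spec_solution_1134_4 nums k out) := by unfold Spec_solution_1134_4; infer_instance

-- ===== CLAIM (what is proved, stated in full; the proofs are below) =====
def Claim_equal_solution_1134_4 : Prop := ∀ (nums : List Int) (k : Int), Dom_solution_1134_4 nums k → Spec_solution_1134_4 nums k (solution_1134_4 nums k)

-- ===== LEMMAS AND PROOFS =====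

-- the common abstraction: number of disjoint pairs summing to k, as a function
-- of the multiset of values only
def pairsN (l : List Int) (k : Int) : Nat :=
  (∑ v ∈ l.toFinset.filter (fun v => v + v < k), min (l.count v) (l.count (k - v)))
  + (if k % 2 = 0 then l.count (k / 2) / 2 else 0)

theorem pairsN_perm (l l' : List Int) (k : Int) (h : l.Perm l') : pairsN l k = pairsN l' k := by
  unfold pairsN
  have hset : l.toFinset = l'.toFinset := by
    ext x; simp [List.mem_toFinset, h.mem_iff]
  rw [hset]
  congr 1
  · exact Finset.sum_congr rfl (fun v _ => by rw [h.count_eq, h.count_eq])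
  · rw [h.count_eq]

theorem pairsN_short (l : List Int) (k : Int) (h : l.length ≤ 1) : pairsN l k = 0 := by
  match l, h with
  | [], _ => simp [pairsN]
  | [x], _ =>
    unfold pairsN
    have h1 : ∀ v ∈ ([x].toFinset.filter (fun v => v + v < k)),
        min (List.count v [x]) (List.count (k - v) [x]) = 0 := by
      intro v hv
      rw [Finset.mem_filter, List.mem_toFinset] at hv
      obtain ⟨hv1, hv2⟩ := hv
      have hvx : v = x := by simpa using hv1
      subst hvx
      have hzero : List.count (k - v) [v] = 0 := by
        rw [List.count_eq_zero]
        have : (k - v) ≠ v := by omega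
        simpa using this
      rw [hzero]
      simp
    rw [Finset.sum_eq_zero h1]
    have h2 : List.count (k / 2) [x] ≤ 1 := by
      simpa using (List.count_le_length : List.count (k / 2) [x] ≤ [x].length)
    split <;> omega

theorem count_cons_ne (v x : Int) (t : List Int) (h : v ≠ x) :
    List.count v (x :: t) = List.count v t := by
  simp [List.count_cons, h, Ne.symm h]

theorem count_append_singleton_ne (v y : Int) (t : List Int) (h : v ≠ y) :
    List.count v (t ++ [y]) = List.count v t := by
  simp [List.count_append, List.count_cons, h, Ne.symm h]

-- dropping the minimum element x when x + x < k and k - x occurs nowhere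
theorem pairsN_drop_lo (x : Int) (t : List Int) (k : Int)
    (hx : x + x < k) (hnc : ∀ a ∈ x :: t, a ≠ k - x) :
    pairsN (x :: t) k = pairsN t k := by
  unfold pairsN
  have hckx : List.count (k - x) (x :: t) = 0 := by
    rw [List.count_eq_zero]
    intro hmem
    exact (hnc _ hmem) rfl
  have hckxt : List.count (k - x) t = 0 := by
    rw [List.count_eq_zero]
    intro hmem
    exact (hnc _ (List.mem_cons_of_mem _ hmem)) rfl
  have hterm : ∀ v : Int, v + v < k → v ≠ x →
      min (List.count v (x :: t)) (List.count (k - v) (x :: t))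
        = min (List.count v t) (List.count (k - v) t) := by
    intro v hvk hvx
    have hkvx : k - v ≠ x := by intro h; omega
    rw [count_cons_ne v x t hvx, count_cons_ne (k - v) x t hkvx]
  have hxterm : min (List.count x (x :: t)) (List.count (k - x) (x :: t)) = 0 := by
    rw [hckx]; simp
  have hxtermt : min (List.count x t) (List.count (k - x) t) = 0 := by
    rw [hckxt]; simp
  have hhalf : (if k % 2 = 0 then List.count (k / 2) (x :: t) / 2 else 0)
      = (if k % 2 = 0 then List.count (k / 2) t / 2 else 0) := by
    by_cases hk : k % 2 = 0
    · rw [if_pos hk, if_pos hk, count_cons_ne _ _ _ (by omega)]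
    · rw [if_neg hk, if_neg hk]
  rw [hhalf]
  congr 1
  by_cases hmem : x ∈ t.toFinset
  · have hset : (x :: t).toFinset = t.toFinset := by
      simp [List.toFinset_cons, Finset.insert_eq_self.mpr hmem]
    rw [hset]
    refine Finset.sum_congr rfl ?_
    intro v hv
    simp only [Finset.mem_filter] at hv
    by_cases hvx : v = x
    · subst hvx; rw [hxterm, hxtermt]
    · exact hterm v hv.2 hvx
  · have hset : (x :: t).toFinset = insert x t.toFinset := by simp [List.toFinset_cons]
    rw [hset, Finset.filter_insert, if_pos hx, Finset.sum_insert (by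
      simp only [Finset.mem_filter]; exact fun h => hmem h.1)]
    rw [hxterm]
    simp only [Nat.zero_add]
    refine Finset.sum_congr rfl ?_
    intro v hv
    simp only [Finset.mem_filter] at hv
    have hvx : v ≠ x := by rintro rfl; exact hmem hv.1
    exact hterm v hv.2 hvx

-- dropping the maximum element y when y + y > k and k - y occurs nowhere
theorem pairsN_drop_hi (y : Int) (t : List Int) (k : Int)
    (hy : k < y + y) (hnc : ∀ a ∈ t ++ [y], a ≠ k - y) :
    pairsN (t ++ [y]) k = pairsN t k := by
  unfold pairsN
  have hcky : List.count (k - y) (t ++ [y]) = 0 := by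
    rw [List.count_eq_zero]; intro hmem; exact (hnc _ hmem) rfl
  have hckyt : List.count (k - y) t = 0 := by
    rw [List.count_eq_zero]
    intro hmem
    exact (hnc _ (by simp [hmem])) rfl
  have hterm : ∀ v : Int, v + v < k → v ≠ y →
      min (List.count v (t ++ [y])) (List.count (k - v) (t ++ [y]))
        = min (List.count v t) (List.count (k - v) t) := by
    intro v hvk hvy
    by_cases hkv : k - v = y
    · have hveq : v = k - y := by omega
      have hcl : List.count v (t ++ [y]) = 0 := by
        rw [List.count_eq_zero]; intro hm; exact (hnc v hm) hveq
      have hct : List.count v t = 0 := by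
        rw [List.count_eq_zero]; intro hm; exact (hnc v (by simp [hm])) hveq
      rw [hcl, hct]; simp
    · rw [count_append_singleton_ne v y t hvy, count_append_singleton_ne (k - v) y t hkv]
  have hyterm_l : min (List.count y (t ++ [y])) (List.count (k - y) (t ++ [y])) = 0 := by
    rw [hcky]; simp
  have hyterm_t : min (List.count y t) (List.count (k - y) t) = 0 := by
    rw [hckyt]; simp
  have hhalf : (if k % 2 = 0 then List.count (k / 2) (t ++ [y]) / 2 else 0)
      = (if k % 2 = 0 then List.count (k / 2) t / 2 else 0) := by
    by_cases hk : k % 2 = 0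
    · rw [if_pos hk, if_pos hk, count_append_singleton_ne _ _ _ (by omega)]
    · rw [if_neg hk, if_neg hk]
  rw [hhalf]
  congr 1
  by_cases hmem : y ∈ t.toFinset
  · have hset : (t ++ [y]).toFinset = t.toFinset := by
      ext a
      simp only [List.mem_toFinset, List.mem_append, List.mem_singleton]
      constructor
      · rintro (h | rfl)
        · exact h
        · exact List.mem_toFinset.mp hmem
      · exact fun h => Or.inl h
    rw [hset]
    refine Finset.sum_congr rfl ?_
    intro v hv
    simp only [Finset.mem_filter] at hv
    by_cases hvy : v = y
    · subst hvy; rw [hyterm_l, hyterm_t]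
    · exact hterm v hv.2 hvy
  · have hset : (t ++ [y]).toFinset = insert y t.toFinset := by
      ext a
      simp only [List.mem_toFinset, List.mem_append, List.mem_singleton,
        Finset.mem_insert]
      tauto
    rw [hset, Finset.filter_insert]
    have hyk : ¬ (y + y < k) := by omega
    rw [if_neg hyk]
    refine Finset.sum_congr rfl ?_
    intro v hv
    simp only [Finset.mem_filter] at hv
    have hvy : v ≠ y := by rintro rfl; exact hmem hv.1
    exact hterm v hv.2 hvy

-- matching the extremes x + y = k of a sorted list x :: m ++ [y]
theorem pairsN_match (x y : Int) (m : List Int) (k : Int)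
    (hsort : (x :: m ++ [y]).Pairwise (· ≤ ·)) (hxy : x + y = k) :
    pairsN (x :: m ++ [y]) k = pairsN m k + 1 := by
  have hxley : x ≤ y := (List.pairwise_cons.mp hsort).1 y (by simp)
  rcases eq_or_lt_of_le hxley with heq | hlt
  · -- x = y = k/2: every element of the list equals x
    subst heq
    have hall : ∀ a ∈ m, a = x := by
      intro a ha
      have h1 := (List.pairwise_cons.mp hsort).1 a (by simp [ha])
      have hp := (List.pairwise_cons.mp hsort).2
      have h2 : a ≤ x := (List.pairwise_append.mp hp).2.2 a ha x (by simp)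
      omega
    have hkx : k = x + x := hxy.symm
    subst hkx
    have hkeven : (x + x) % 2 = 0 := by omega
    have hk2 : (x + x) / 2 = x := by omega
    unfold pairsN
    have hfilter_l : ((x :: m ++ [x]).toFinset).filter (fun v => v + v < x + x) = ∅ := by
      rw [Finset.filter_eq_empty_iff]
      intro v hv
      rw [List.mem_toFinset] at hv
      have hvx : v = x := by
        rcases List.mem_cons.mp hv with h | h
        · exact h
        · rcases List.mem_append.mp h with h | h
          · exact hall v h
          · simpa using h
      omega
    have hfilter_m : (m.toFinset).filter (fun v => v + v < x + x) = ∅ := by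
      rw [Finset.filter_eq_empty_iff]
      intro v hv
      rw [List.mem_toFinset] at hv
      have := hall v hv
      omega
    rw [hfilter_l, hfilter_m, if_pos hkeven, if_pos hkeven, hk2]
    have hcl : List.count x (x :: m ++ [x]) = m.count x + 2 := by
      rw [show x :: m ++ [x] = x :: (m ++ [x]) from rfl, List.count_cons_self,
        List.count_append]
      simp [List.count_cons]
    rw [hcl]
    simp only [Finset.sum_empty, Nat.zero_add]
    omega
  · -- x < y
    have hxk : x + x < k := by omega
    have hyk : k < y + y := by omega
    have hky_x : k - x = y := by omega
    unfold pairsN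
    have hcx : List.count x (x :: m ++ [y]) = m.count x + 1 := by
      rw [show x :: m ++ [y] = x :: (m ++ [y]) from rfl, List.count_cons_self,
        count_append_singleton_ne x y m (by omega)]
    have hcy : List.count y (x :: m ++ [y]) = m.count y + 1 := by
      rw [show x :: m ++ [y] = x :: (m ++ [y]) from rfl,
        count_cons_ne y x (m ++ [y]) (by omega), List.count_append]
      simp [List.count_cons]
    have hcother : ∀ v : Int, v ≠ x → v ≠ y → List.count v (x :: m ++ [y]) = m.count v := by
      intro v h1 h2
      rw [show x :: m ++ [y] = x :: (m ++ [y]) from rfl, count_cons_ne v x _ h1,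
        count_append_singleton_ne v y m h2]
    have hhalf : (if k % 2 = 0 then List.count (k / 2) (x :: m ++ [y]) / 2 else 0)
        = (if k % 2 = 0 then m.count (k / 2) / 2 else 0) := by
      by_cases hk : k % 2 = 0
      · rw [if_pos hk, if_pos hk, hcother _ (by omega) (by omega)]
      · rw [if_neg hk, if_neg hk]
    rw [hhalf]
    have hterm_x : min (List.count x (x :: m ++ [y])) (List.count (k - x) (x :: m ++ [y]))
        = min (m.count x) (m.count (k - x)) + 1 := by
      rw [hky_x, hcx, hcy]
      simp only [Nat.min_def]
      split_ifs <;> omega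
    have hterm : ∀ v : Int, v + v < k → v ≠ x →
        min (List.count v (x :: m ++ [y])) (List.count (k - v) (x :: m ++ [y]))
          = min (m.count v) (m.count (k - v)) := by
      intro v hvk hvx
      have hvy : v ≠ y := by omega
      rw [hcother v hvx hvy]
      have h1 : k - v ≠ x := by omega
      have h2 : k - v ≠ y := by intro h; exact hvx (by omega)
      rw [hcother _ h1 h2]
    have hsetl : (x :: m ++ [y]).toFinset = insert x (insert y m.toFinset) := by
      ext a
      simp only [List.mem_toFinset, List.mem_cons, List.mem_append,
        List.mem_singleton, Finset.mem_insert]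
      tauto
    have hynotf : ¬ (y + y < k) := by omega
    rw [hsetl]
    have hstep : ((insert x (insert y m.toFinset)).filter (fun v => v + v < k))
        = insert x ((m.toFinset).filter (fun v => v + v < k)) := by
      rw [Finset.filter_insert, Finset.filter_insert, if_neg hynotf, if_pos hxk]
    rw [hstep]
    by_cases hmem : x ∈ (m.toFinset).filter (fun v => v + v < k)
    · rw [Finset.insert_eq_self.mpr hmem]
      rw [← Finset.add_sum_erase _ _ hmem, ← Finset.add_sum_erase _ _ hmem]
      have hrest : ∀ v ∈ ((m.toFinset).filter (fun v => v + v < k)).erase x,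
          min (List.count v (x :: m ++ [y])) (List.count (k - v) (x :: m ++ [y]))
            = min (m.count v) (m.count (k - v)) := by
        intro v hv
        have hvx := Finset.ne_of_mem_erase hv
        have hvf := Finset.mem_of_mem_erase hv
        simp only [Finset.mem_filter] at hvf
        exact hterm v hvf.2 hvx
      rw [Finset.sum_congr rfl hrest, hterm_x]
      omega
    · rw [Finset.sum_insert hmem]
      have hcxm : m.count x = 0 := by
        rw [List.count_eq_zero]
        intro hmm
        exact hmem (Finset.mem_filter.mpr ⟨List.mem_toFinset.mpr hmm, hxk⟩)
      rw [Finset.sum_congr rfl (by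
        intro v hv
        simp only [Finset.mem_filter] at hv
        have hvx : v ≠ x := by rintro rfl; exact hmem (Finset.mem_filter.mpr hv)
        exact hterm v hv.2 hvx), hterm_x]
      omega

-- the segment s[a..b] inclusive
def segN (s : List Int) (a b : Nat) : List Int := (s.drop a).take (b + 1 - a)

theorem segN_cons (s : List Int) (a b : Nat) (ha : a ≤ b) (hb : b < s.length) :
    segN s a b = s[a] :: segN s (a + 1) b := by
  unfold segN
  rw [List.drop_eq_getElem_cons (by omega)]
  have h1 : b + 1 - a = (b - a) + 1 := by omega
  have h2 : b + 1 - (a + 1) = b - a := by omega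
  rw [h1, h2, List.take_succ_cons]

theorem segN_snoc (s : List Int) (a b : Nat) (ha : a ≤ b) (ha0 : 0 < a ∨ a < b)
    (hb : b < s.length) :
    segN s a b = segN s a (b - 1) ++ [s[b]] := by
  rcases Nat.lt_or_ge a b with hab | hab
  · unfold segN
    have h1 : b + 1 - a = (b - a) + 1 := by omega
    have h2 : b - 1 + 1 - a = b - a := by omega
    have hlen : b - a < (s.drop a).length := by
      rw [List.length_drop]; omega
    rw [h1, h2, List.take_succ, List.getElem?_eq_getElem hlen]
    have hidx : a + (b - a) = b := by omega
    simp [List.getElem_drop, hidx]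
  · have hab' : a = b := by omega
    subst hab'
    have ha1 : 0 < a := by omega
    unfold segN
    have h1 : a + 1 - a = 1 := by omega
    have h2 : a - 1 + 1 - a = 0 := by omega
    rw [h1, h2, List.drop_eq_getElem_cons (show a < s.length from hb)]
    rfl

theorem segN_sorted (s : List Int) (a b : Nat) (hs : s.Pairwise (· ≤ ·)) :
    (segN s a b).Pairwise (· ≤ ·) :=
  List.Pairwise.sublist ((List.take_sublist _ _).trans (List.drop_sublist _ _)) hs

theorem segN_middle (s : List Int) (a b : Nat) (ha : a < b) (hb : b < s.length) :
    segN s a b = s[a] :: segN s (a + 1) (b - 1) ++ [s[b]] := by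
  rw [segN_cons s a b (by omega) hb]
  by_cases h : a + 1 < b
  · rw [segN_snoc s (a + 1) b (by omega) (by omega) hb]
    simp
  · have hba : b = a + 1 := by omega
    subst hba
    have h1 : segN s (a + 1) (a + 1) = [s[a + 1]] := by
      unfold segN
      rw [List.drop_eq_getElem_cons (show a + 1 < s.length from hb)]
      have : a + 1 + 1 - (a + 1) = 1 := by omega
      rw [this]
      rfl
    have hmid : segN s (a + 1) (a + 1 - 1) = [] := by
      unfold segN
      have : a + 1 - 1 + 1 - (a + 1) = 0 := by omega
      rw [this]
      simp
    rw [h1, hmid]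
    simp

-- loop invariant: the two-pointer sweep over a sorted list computes pairsN of the segment
theorem loop_eq (s : List Int) (k : Int) (hs : s.Pairwise (· ≤ ·)) :
    ∀ n : Nat, ∀ i j ans : Int, (j - i).toNat ≤ n → 0 ≤ i → j < s.length →
      solution_1134_4_loop s k i j ans = ans + (pairsN (segN s i.toNat j.toNat) k : Int) := by
  intro n
  induction n with
  | zero =>
    intro i j ans hn hi hj
    rw [solution_1134_4_loop]
    have hij : ¬ i < j := by omega
    rw [if_neg hij]
    have : pairsN (segN s i.toNat j.toNat) k = 0 := by
      apply pairsN_short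
      unfold segN
      rw [List.length_take, List.length_drop]
      omega
    rw [this]
    simp
  | succ n ih =>
    intro i j ans hn hi hj
    rw [solution_1134_4_loop]
    by_cases hij : i < j
    · rw [if_pos hij]
      have hjnn : 0 ≤ j := by omega
      have hiN : i.toNat < j.toNat := by omega
      have hjN : j.toNat < s.length := by omega
      have hxi : PySem.List.pyGetD s i 0 = s[i.toNat] :=
        PySem.List.pyGetD_eq_getElem s 0 hi (by omega)
      have hyj : PySem.List.pyGetD s j 0 = s[j.toNat] :=
        PySem.List.pyGetD_eq_getElem s 0 hjnn (by omega)
      have hmid := segN_middle s i.toNat j.toNat hiN hjN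
      have hsorted : (segN s i.toNat j.toNat).Pairwise (· ≤ ·) := segN_sorted s _ _ hs
      have hsort' : (s[i.toNat] :: segN s (i.toNat + 1) (j.toNat - 1) ++ [s[j.toNat]]).Pairwise (· ≤ ·) :=
        hmid ▸ hsorted
      have hbounds : ∀ a ∈ s[i.toNat] :: segN s (i.toNat + 1) (j.toNat - 1) ++ [s[j.toNat]],
          s[i.toNat] ≤ a ∧ a ≤ s[j.toNat] := by
        intro a ha
        rcases List.mem_cons.mp ha with rfl | ha'
        · exact ⟨le_refl _, (List.pairwise_cons.mp hsort').1 _ (by simp)⟩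
        · rcases List.mem_append.mp ha' with h2 | h2
          · refine ⟨(List.pairwise_cons.mp hsort').1 _ (by simp [h2]), ?_⟩
            have hp := (List.pairwise_cons.mp hsort').2
            exact (List.pairwise_append.mp hp).2.2 a h2 _ (by simp)
          · have : a = s[j.toNat] := by simpa using h2
            subst this
            exact ⟨(List.pairwise_cons.mp hsort').1 _ (by simp), le_refl _⟩
      have hxley : s[i.toNat] ≤ s[j.toNat] := (hbounds s[j.toNat] (by simp)).1.trans
        ((hbounds s[j.toNat] (by simp)).2)
      simp only [hxi, hyj]
      by_cases hsum : s[i.toNat] + s[j.toNat] = k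
      · rw [if_pos hsum]
        rw [ih (i + 1) (j - 1) (ans + 1) (by omega) (by omega) (by omega)]
        have h1 : (i + 1).toNat = i.toNat + 1 := by omega
        have h2 : (j - 1).toNat = j.toNat - 1 := by omega
        rw [h1, h2]
        have hmi := pairsN_match s[i.toNat] s[j.toNat] (segN s (i.toNat + 1) (j.toNat - 1)) k
          hsort' hsum
        rw [hmid, hmi]
        push_cast
        ring
      · rw [if_neg hsum]
        by_cases hlt : s[i.toNat] + s[j.toNat] < k
        · rw [if_pos hlt]
          rw [ih (i + 1) j ans (by omega) (by omega) hj]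
          have h1 : (i + 1).toNat = i.toNat + 1 := by omega
          rw [h1]
          have hrest : segN s (i.toNat + 1) j.toNat
              = segN s (i.toNat + 1) (j.toNat - 1) ++ [s[j.toNat]] :=
            segN_snoc s (i.toNat + 1) j.toNat (by omega) (by omega) hjN
          have hdrop := pairsN_drop_lo s[i.toNat]
            (segN s (i.toNat + 1) (j.toNat - 1) ++ [s[j.toNat]]) k
            (by omega)
            (by
              intro a ha
              have := hbounds a ha
              omega)
          rw [hmid, hrest, List.cons_append, hdrop]
        · rw [if_neg hlt]
          have hgt : k < s[i.toNat] + s[j.toNat] := by omega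
          rw [ih i (j - 1) ans (by omega) hi (by omega)]
          have h2 : (j - 1).toNat = j.toNat - 1 := by omega
          rw [h2]
          have hrest : segN s i.toNat (j.toNat - 1)
              = s[i.toNat] :: segN s (i.toNat + 1) (j.toNat - 1) :=
            segN_cons s i.toNat (j.toNat - 1) (by omega) (by omega)
          have hdrop := pairsN_drop_hi s[j.toNat]
            (s[i.toNat] :: segN s (i.toNat + 1) (j.toNat - 1)) k
            (by omega)
            (by
              intro a ha
              have := hbounds a ha
              omega)
          rw [hmid, hrest, hdrop]
    · rw [if_neg hij]
      have : pairsN (segN s i.toNat j.toNat) k = 0 := by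
        apply pairsN_short
        unfold segN
        rw [List.length_take, List.length_drop]
        omega
      rw [this]
      simp

-- A computes pairsN nums k
theorem A_eq_pairsN (nums : List Int) (k : Int) :
    solution_1134_4 nums k = (pairsN nums k : Int) := by
  unfold solution_1134_4
  set s := PySem.List.sorted nums (fun x => x) false with hsdef
  have hperm : s.Perm nums := PySem.List.sorted_perm nums (fun x => x) false
  have hsorted : s.Pairwise (· ≤ ·) := PySem.List.sorted_pairwise nums (fun x => x)
  rcases Nat.eq_zero_or_pos s.length with h0 | hpos
  · have hse : s = [] := List.length_eq_zero_iff.mp h0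
    rw [hse] at hperm
    have hnil : nums = [] := hperm.symm.eq_nil
    rw [solution_1134_4_loop]
    have hneg : ¬ (0 : Int) < (s.length : Int) - 1 := by omega
    rw [if_neg hneg, hnil]
    simp [pairsN]
  · rw [loop_eq s k hsorted (((s.length : Int) - 1 - 0).toNat) 0 ((s.length : Int) - 1) 0
      (le_refl _) (by omega) (by omega)]
    have h1 : (0 : Int).toNat = 0 := rfl
    have h2 : ((s.length : Int) - 1).toNat = s.length - 1 := by omega
    rw [h1, h2]
    have hseg : segN s 0 (s.length - 1) = s := by
      unfold segN
      rw [List.drop_zero]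
      have : s.length - 1 + 1 - 0 = s.length := by omega
      rw [this, List.take_length]
    rw [hseg]
    rw [pairsN_perm s nums k hperm]
    simp

-- B computes pairsN nums k
theorem B_eq_pairsN (nums : List Int) (k : Int) :
    solution_1134_4_alt nums k = (pairsN nums k : Int) := by
  simp only [solution_1134_4_alt]
  rw [PySem.Dict.foldl_insert_getD_add_one_eq_counter]
  rw [PySem.Dict.items_counter]
  have hgetD : ∀ v : Int, (PySem.Dict.counter nums).getD v 0 = (nums.count v : Int) := by
    intro v
    rw [PySem.Dict.getD_counter]
  -- fold over mapped list = sum over the dedup list of the per-value term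
  have hfold : ∀ (l : List Int) (acc : Int),
      (l.map (fun v => (v, (nums.count v : Int)))).foldl (fun ans p =>
        let v := p.1; let c := p.2; let w := k - v
        if v < w then ans + min c ((PySem.Dict.counter nums).getD w 0)
        else if v = w then ans + PySem.Int.floordiv c 2
        else ans) acc
      = acc + (l.map (fun v =>
          if v < k - v then min ((nums.count v : Int)) ((nums.count (k - v) : Int))
          else if v = k - v then PySem.Int.floordiv (nums.count v : Int) 2
          else 0)).sum := by
    intro l
    induction l with
    | nil => intro acc; simp
    | cons a l ihl =>
      intro acc
      simp only [List.map_cons, List.foldl_cons, List.sum_cons, ihl]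
      rw [hgetD]
      by_cases h1 : a < k - a
      · simp only [if_pos h1]; ring
      · rw [if_neg h1, if_neg h1]
        by_cases h2 : a = k - a
        · simp only [if_pos h2]; ring
        · simp only [if_neg h2]; ring
  rw [hfold]
  rw [Int.zero_add]
  -- per-value term as Nat, with Python floor division = Nat division on counts
  have hfd : ∀ c : Nat, PySem.Int.floordiv (c : Int) 2 = ((c / 2 : Nat) : Int) := by
    intro c
    have : PySem.Int.floordiv (c : Int) 2 = Int.fdiv (c : Int) 2 := rfl
    rw [this, Int.fdiv_eq_ediv_of_nonneg _ (by norm_num)]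
    omega
  have hterm : ∀ v : Int,
      (if v < k - v then min ((nums.count v : Int)) ((nums.count (k - v) : Int))
       else if v = k - v then PySem.Int.floordiv (nums.count v : Int) 2
       else 0)
      = ((if v + v < k then min (nums.count v) (nums.count (k - v)) else 0 : Nat) : Int)
        + ((if v + v = k then nums.count v / 2 else 0 : Nat) : Int) := by
    intro v
    by_cases h1 : v < k - v
    · have h1' : v + v < k := by omega
      have h2' : ¬ (v + v = k) := by omega
      rw [if_pos h1, if_pos h1', if_neg h2']
      push_cast
      omega
    · rw [if_neg h1]
      have h1' : ¬ (v + v < k) := by omega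
      rw [if_neg h1']
      by_cases h2 : v = k - v
      · have h2' : v + v = k := by omega
        rw [if_pos h2, if_pos h2', hfd]
        push_cast
        omega
      · have h2' : ¬ (v + v = k) := by omega
        rw [if_neg h2, if_neg h2']
        simp
  rw [List.map_congr_left (fun v _ => hterm v)]
  -- split the sum into the two parts
  have hnodup : (PySem.Set.ofList nums).Nodup := PySem.Set.nodup_ofList nums
  -- now a Nat identity: sum over the dedup list equals pairsN
  have hcast : (fun v : Int => ((if v + v < k then min (nums.count v) (nums.count (k - v)) else 0 : Nat) : Int)
        + ((if v + v = k then nums.count v / 2 else 0 : Nat) : Int))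
      = (fun v : Int => (((if v + v < k then min (nums.count v) (nums.count (k - v)) else 0)
        + (if v + v = k then nums.count v / 2 else 0) : Nat) : Int)) := by
    funext v; push_cast; ring
  rw [hcast]
  have hnodup : (PySem.Set.ofList nums).Nodup := PySem.Set.nodup_ofList nums
  have hsum_set : ∀ f : Int → Nat, ((PySem.Set.ofList nums).map f).sum = ∑ v ∈ nums.toFinset, f v := by
    intro f
    have htf : (PySem.Set.ofList nums).toFinset = nums.toFinset := by
      ext x
      simp [List.mem_toFinset, PySem.Set.mem_ofList nums x]
    rw [← htf, List.sum_toFinset _ hnodup]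
  have hmapcast : ∀ (l : List Int) (f : Int → Nat),
      (l.map (fun v => ((f v : Nat) : Int))).sum = ((l.map f).sum : Int) := by
    intro l f
    induction l with
    | nil => simp
    | cons a l ih => simp [ih]
  rw [hmapcast _ (fun v => (if v + v < k then min (nums.count v) (nums.count (k - v)) else 0)
        + (if v + v = k then nums.count v / 2 else 0))]
  congr 1
  rw [hsum_set]
  rw [Finset.sum_add_distrib]
  unfold pairsN
  congr 1
  · rw [Finset.sum_filter]
  · -- the k/2 part
    by_cases hk : k % 2 = 0
    · rw [if_pos hk]
      have hiff : ∀ v : Int, v + v = k ↔ v = k / 2 := by intro v; omega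
      have : (∑ v ∈ nums.toFinset, if v + v = k then nums.count v / 2 else 0)
          = ∑ v ∈ nums.toFinset, if v = k / 2 then nums.count (k / 2) / 2 else 0 := by
        refine Finset.sum_congr rfl ?_
        intro v _
        by_cases h : v + v = k
        · rw [if_pos h, if_pos ((hiff v).mp h)]
          have : v = k / 2 := (hiff v).mp h
          rw [this]
        · rw [if_neg h, if_neg (fun hh => h ((hiff v).mpr hh))]
      rw [this, Finset.sum_ite_eq' nums.toFinset (k / 2) (fun _ => nums.count (k / 2) / 2)]
      by_cases hm : k / 2 ∈ nums.toFinset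
      · rw [if_pos hm]
      · rw [if_neg hm]
        have : nums.count (k / 2) = 0 := by
          rw [List.count_eq_zero]
          intro hmem
          exact hm (List.mem_toFinset.mpr hmem)
        omega
    · rw [if_neg hk]
      refine (Finset.sum_eq_zero ?_)
      intro v _
      have : ¬ (v + v = k) := by omega
      rw [if_neg this]
-- ===== VERDICT (by name: the statement is the Claim_ definition above) =====
theorem solution_1134_4_spec : Claim_equal_solution_1134_4 := by
  intro nums k _
  unfold Spec_solution_1134_4
  rw [A_eq_pairsN, B_eq_pairsN]
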